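-- pv_equiv track=rewrite | github.com/caoyu-dev/pystudy | Chapter7/BovineGenomics.py | count_explanatory_sets
-- ===== SOURCE A (Python) =====
-- from itertools import combinations
--
-- def count_explanatory_sets(N, M, spotty_cows, plain_cows):
--     count = 0
--
--     for positions in combinations(range(M), 3):
--         spotty_patterns = set()
--         plain_patterns = set()
--
--         for cow in spotty_cows:
--             pattern = (cow[positions[0]], cow[positions[1]], cow[positions[2]])
--             spotty_patterns.add(pattern)
--
--         for cow in plain_cows:
--             pattern = (cow[positions[0]], cow[positions[1]], cow[positions[2]])
--             plain_patterns.add(pattern)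
--
--         if spotty_patterns.isdisjoint(plain_patterns):
--             count += 1
--
--     return count
-- ===== SOURCE B (Python) =====
-- from itertools import combinations
--
-- def count_explanatory_sets(N, M, spotty_cows, plain_cows):
--     if M < 3:
--         return 0
--     total = M * (M - 1) * (M - 2) // 6
--     bad = set()
--     for s in spotty_cows:
--         for p in plain_cows:
--             agree = [i for i in range(M) if s[i] == p[i]]
--             bad.update(combinations(agree, 3))
--     return total - len(bad)
-- ===== Notes on version B (the rewrite author's own statement) =====
-- stated objective: alternative
-- what changed: Instead of scanning all C(M,3) position-triples and building per-triple pattern sets, B enumerates cow pairs (s,p), collects the positions where they agree, marks every 3-combination of those agreeing positions as a 'bad' triple, and returns C(M,3) minus the number of distinct bad triples.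
import Mathlib
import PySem

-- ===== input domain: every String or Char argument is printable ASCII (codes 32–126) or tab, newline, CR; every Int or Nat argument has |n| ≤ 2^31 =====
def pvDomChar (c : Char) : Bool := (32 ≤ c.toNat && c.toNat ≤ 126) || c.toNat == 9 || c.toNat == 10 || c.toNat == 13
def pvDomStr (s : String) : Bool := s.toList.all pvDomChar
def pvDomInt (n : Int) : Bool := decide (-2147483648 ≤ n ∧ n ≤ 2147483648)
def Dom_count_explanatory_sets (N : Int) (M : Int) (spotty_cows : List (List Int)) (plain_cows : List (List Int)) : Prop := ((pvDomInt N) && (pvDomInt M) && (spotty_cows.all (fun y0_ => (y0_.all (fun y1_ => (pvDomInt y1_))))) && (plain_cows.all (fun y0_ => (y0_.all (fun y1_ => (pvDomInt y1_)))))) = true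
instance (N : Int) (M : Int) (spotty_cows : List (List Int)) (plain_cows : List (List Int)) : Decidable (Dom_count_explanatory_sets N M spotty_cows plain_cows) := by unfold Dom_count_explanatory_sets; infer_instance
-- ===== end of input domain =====

-- B counts the distinct position-triples ruled out by each (spotty, plain) cow pair and subtracts
-- them from C(M,3), instead of A's scan of every triple with per-triple pattern sets (objective: alternative).

-- ===== PORT A =====
-- pattern of a cow at a list of positions: (cow[p0], cow[p1], cow[p2]) as a list
-- (indices are in range under Pre_; pyGetD's default 0 is never used there)
def pvPattern (positions : List Int) (cow : List Int) : List Int :=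
  positions.map (fun i => PySem.List.pyGetD cow i 0)

def count_explanatory_sets (N : Int) (M : Int) (spotty_cows : List (List Int)) (plain_cows : List (List Int)) : Int :=
  (PySem.List.combinations (PySem.List.pyRange 0 M 1) 3).foldl
    (fun count positions =>
      let spotty_patterns : PySem.Set (List Int) :=
        PySem.Set.ofList (spotty_cows.map (fun cow => pvPattern positions cow))
      let plain_patterns : PySem.Set (List Int) :=
        PySem.Set.ofList (plain_cows.map (fun cow => pvPattern positions cow))
      if PySem.Set.isdisjoint spotty_patterns plain_patterns then count + 1 else count)
    0

-- ===== PORT B =====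
def count_explanatory_sets_alt (N : Int) (M : Int) (spotty_cows : List (List Int)) (plain_cows : List (List Int)) : Int :=
  if M < 3 then 0
  else
    let total := PySem.Int.floordiv (M * (M - 1) * (M - 2)) 6
    let bad : PySem.Set (List Int) :=
      spotty_cows.foldl
        (fun b s =>
          plain_cows.foldl
            (fun b p =>
              PySem.Set.update b
                (PySem.List.combinations
                  ((PySem.List.pyRange 0 M 1).filter
                    (fun i => PySem.List.pyGetD s i 0 == PySem.List.pyGetD p i 0)) 3))
            b)
        PySem.Set.empty
    total - PySem.Set.len bad

-- ===== PRECONDITION & SPEC =====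
-- Pre_ excludes exactly the inputs where Python A raises IndexError: M ≥ 3 with some cow shorter than M.
def Pre_count_explanatory_sets (N : Int) (M : Int) (spotty_cows : List (List Int)) (plain_cows : List (List Int)) : Prop :=
  3 ≤ M → ((∀ cow ∈ spotty_cows, M ≤ (cow.length : Int)) ∧ (∀ cow ∈ plain_cows, M ≤ (cow.length : Int)))
instance (N : Int) (M : Int) (spotty_cows : List (List Int)) (plain_cows : List (List Int)) : Decidable (Pre_count_explanatory_sets N M spotty_cows plain_cows) := by unfold Pre_count_explanatory_sets; infer_instance

def pvWitness_count_explanatory_sets : Int × Int × List (List Int) × List (List Int) :=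
  (2, 3, [[1, 2, 3]], [[1, 5, 6]])

def Spec_count_explanatory_sets (N : Int) (M : Int) (spotty_cows : List (List Int)) (plain_cows : List (List Int)) (out : Int) : Prop := out = count_explanatory_sets_alt N M spotty_cows plain_cows
instance (N : Int) (M : Int) (spotty_cows : List (List Int)) (plain_cows : List (List Int)) (out : Int) : Decidable (Spec_count_explanatory_sets N M spotty_cows plain_cows out) := by unfold Spec_count_explanatory_sets; infer_instance

-- ===== CLAIM (what is proved, stated in full; the proofs are below) =====
def Claim_equal_count_explanatory_sets : Prop := ∀ (N : Int) (M : Int) (spotty_cows : List (List Int)) (plain_cows : List (List Int)), Dom_count_explanatory_sets N M spotty_cows plain_cows → Pre_count_explanatory_sets N M spotty_cows plain_cows → Spec_count_explanatory_sets N M spotty_cows plain_cows (count_explanatory_sets N M spotty_cows plain_cows)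

-- ===== LEMMAS AND PROOFS =====

-- 'some (s, p) pair shows the same pattern at these positions' — the triples A rejects / B marks bad
def pvBad (spotty_cows plain_cows : List (List Int)) (pos : List Int) : Bool :=
  spotty_cows.any (fun s => plain_cows.any (fun p => pvPattern pos s == pvPattern pos p))

-- A's per-triple disjointness test is the negation of pvBad
theorem pv_isdisjoint_eq_not_bad (spotty_cows plain_cows : List (List Int)) (pos : List Int) :
    PySem.Set.isdisjoint (PySem.Set.ofList (spotty_cows.map (fun cow => pvPattern pos cow)))
      (PySem.Set.ofList (plain_cows.map (fun cow => pvPattern pos cow)))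
      = !(pvBad spotty_cows plain_cows pos) := by
  cases h : pvBad spotty_cows plain_cows pos with
  | true =>
    simp only [Bool.not_true]
    rw [← Bool.not_eq_true, PySem.Set.isdisjoint_iff]
    simp only [pvBad, List.any_eq_true, beq_iff_eq] at h
    obtain ⟨s, hs, p, hp, hpat⟩ := h
    intro hdis
    exact hdis (pvPattern pos s)
      (by rw [PySem.Set.mem_ofList]; exact List.mem_map_of_mem hs)
      (by rw [PySem.Set.mem_ofList, hpat]; exact List.mem_map_of_mem hp)
  | false =>
    simp only [Bool.not_false]
    rw [PySem.Set.isdisjoint_iff]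
    intro x hx hx'
    rw [PySem.Set.mem_ofList, List.mem_map] at hx hx'
    obtain ⟨s, hs, rfl⟩ := hx
    obtain ⟨p, hp, heq⟩ := hx'
    have hb : pvBad spotty_cows plain_cows pos = true := by
      simp only [pvBad, List.any_eq_true, beq_iff_eq]
      exact ⟨s, hs, p, hp, heq.symm⟩
    rw [h] at hb; exact Bool.false_ne_true hb

-- A is the count of the good triples
theorem pv_countA (N M : Int) (spotty_cows plain_cows : List (List Int)) :
    count_explanatory_sets N M spotty_cows plain_cows
      = ((PySem.List.combinations (PySem.List.pyRange 0 M 1) 3).countP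
          (fun pos => !(pvBad spotty_cows plain_cows pos)) : Int) := by
  unfold count_explanatory_sets
  simp only [pv_isdisjoint_eq_not_bad]
  rw [PySem.List.foldl_count_if]
  simp

-- membership and nodup for a foldl of Set.update steps
theorem pv_mem_foldl_update {α β : Type} [BEq α] [LawfulBEq α]
    (g : β → List α) (l : List β) (b : PySem.Set α) (y : α) :
    y ∈ l.foldl (fun b x => PySem.Set.update b (g x)) b ↔ y ∈ b ∨ ∃ x ∈ l, y ∈ g x := by
  induction l generalizing b with
  | nil => simp
  | cons x xs ih => simp [ih, PySem.Set.mem_update]; tauto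

theorem pv_nodup_foldl_update {α β : Type} [BEq α] [LawfulBEq α]
    (g : β → List α) (l : List β) (b : PySem.Set α) (hb : b.Nodup) :
    (l.foldl (fun b x => PySem.Set.update b (g x)) b).Nodup := by
  induction l generalizing b with
  | nil => exact hb
  | cons x xs ih => exact ih _ (PySem.Set.nodup_update _ _ hb)

theorem pv_mem_foldl2 {α β γ : Type} [BEq α] [LawfulBEq α]
    (g : β → γ → List α) (l1 : List β) (l2 : List γ) (b : PySem.Set α) (y : α) :
    y ∈ l1.foldl (fun b s => l2.foldl (fun b p => PySem.Set.update b (g s p)) b) b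
      ↔ y ∈ b ∨ ∃ s ∈ l1, ∃ p ∈ l2, y ∈ g s p := by
  induction l1 generalizing b with
  | nil => simp
  | cons x xs ih => simp [ih, pv_mem_foldl_update, or_assoc]

theorem pv_nodup_foldl2 {α β γ : Type} [BEq α] [LawfulBEq α]
    (g : β → γ → List α) (l1 : List β) (l2 : List γ) (b : PySem.Set α) (hb : b.Nodup) :
    (l1.foldl (fun b s => l2.foldl (fun b p => PySem.Set.update b (g s p)) b) b).Nodup := by
  induction l1 generalizing b with
  | nil => exact hb
  | cons x xs ih => exact ih _ (pv_nodup_foldl_update _ _ _ hb)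

-- combinations of a filtered list = combinations whose members all pass the filter
theorem pv_mem_comb_filter {α : Type} (l : List α) (q : α → Bool) (r : Nat) (T : List α) :
    T ∈ PySem.List.combinations (l.filter q) r
      ↔ T ∈ PySem.List.combinations l r ∧ ∀ i ∈ T, q i = true := by
  simp only [PySem.List.mem_combinations_iff]
  constructor
  · rintro ⟨hsub, hlen⟩
    have hmem : ∀ i ∈ T, q i = true := fun i hi => List.of_mem_filter (hsub.mem hi)
    exact ⟨⟨hsub.trans List.filter_sublist, hlen⟩, hmem⟩
  · rintro ⟨⟨hsub, hlen⟩, hmem⟩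
    refine ⟨?_, hlen⟩
    have hfe : T.filter q = T := List.filter_eq_self.mpr hmem
    rw [← hfe]
    exact hsub.filter q

theorem pv_nodup_combinations {α : Type} (xs : List α) (r : Nat) (h : xs.Nodup) :
    (PySem.List.combinations xs r).Nodup := by
  induction xs generalizing r with
  | nil =>
    cases r with
    | zero => simp [PySem.List.combinations_zero]
    | succ r => simp [PySem.List.combinations_nil_succ]
  | cons x xs ih =>
    cases r with
    | zero => simp [PySem.List.combinations_zero]
    | succ r =>
      rw [PySem.List.combinations_cons_succ, List.nodup_append]
      obtain ⟨hx, hxs⟩ := List.nodup_cons.mp h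
      refine ⟨List.Nodup.map (fun a b hab => by injection hab) (ih r hxs), ih (r+1) hxs, ?_⟩
      intro c hc1 d hd heq
      obtain ⟨t, ht, rfl⟩ := List.mem_map.mp hc1
      subst heq
      have hm := (PySem.List.mem_combinations_iff xs (r+1) (x :: t)).mp hd
      exact hx (hm.1.mem List.mem_cons_self)

theorem pv_length_combinations {α : Type} (xs : List α) (r : Nat) :
    (PySem.List.combinations xs r).length = xs.length.choose r := by
  induction xs generalizing r with
  | nil =>
    cases r with
    | zero => simp [PySem.List.combinations_zero]
    | succ r => simp [PySem.List.combinations_nil_succ]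
  | cons x xs ih =>
    cases r with
    | zero => simp [PySem.List.combinations_zero]
    | succ r =>
      rw [PySem.List.combinations_cons_succ]
      simp [List.length_append, ih r, ih (r+1), Nat.choose_succ_succ]

theorem pv_two_choose_two (n : Nat) : 2 * n.choose 2 = n * (n - 1) := by
  induction n with
  | zero => simp
  | succ n ih =>
    rw [Nat.choose_succ_succ, Nat.mul_add, ih, Nat.choose_one_right]
    cases n with
    | zero => simp
    | succ m => simp only [Nat.add_sub_cancel]; ring

theorem pv_six_choose_three (n : Nat) : 6 * n.choose 3 = n * (n - 1) * (n - 2) := by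
  induction n with
  | zero => simp
  | succ n ih =>
    rw [Nat.choose_succ_succ, Nat.mul_add, ih]
    cases n with
    | zero => simp
    | succ m =>
      cases m with
      | zero => simp
      | succ k =>
        have h6 : 6 * (k+2).choose 2 = 3 * ((k+2) * (k+1)) := by
          have h2 := pv_two_choose_two (k+2)
          have e : k+2-1 = k+1 := rfl
          rw [e] at h2
          omega
        show 6 * (k+2).choose 2 + (k+2) * (k+2-1) * (k+2-2) = (k+3) * (k+3-1) * (k+3-2)
        have e1 : k+2-1 = k+1 := rfl
        have e2 : k+2-2 = k := rfl
        have e3 : k+3-1 = k+2 := rfl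
        have e4 : k+3-2 = k+1 := rfl
        rw [h6, e1, e2, e3, e4]
        ring

theorem pv_countP_not {α : Type} (l : List α) (p : α → Bool) :
    l.countP p + l.countP (fun x => !p x) = l.length := by
  induction l with
  | nil => simp
  | cons x xs ih =>
    simp only [List.countP_cons, List.length_cons]
    cases h : p x <;> simp <;> omega

-- B's bad set holds exactly the bad triples among combinations(range(M), 3)
theorem pv_badset_mem (M : Int) (spotty_cows plain_cows : List (List Int)) (T : List Int) :
    T ∈ spotty_cows.foldl
          (fun b s =>
            plain_cows.foldl
              (fun b p =>
                PySem.Set.update b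
                  (PySem.List.combinations
                    ((PySem.List.pyRange 0 M 1).filter
                      (fun i => PySem.List.pyGetD s i 0 == PySem.List.pyGetD p i 0)) 3))
              b)
          (PySem.Set.empty : PySem.Set (List Int))
      ↔ T ∈ PySem.List.combinations (PySem.List.pyRange 0 M 1) 3
          ∧ pvBad spotty_cows plain_cows T = true := by
  rw [pv_mem_foldl2]
  simp only [PySem.Set.empty, List.not_mem_nil, false_or]
  constructor
  · rintro ⟨s, hs, p, hp, hT⟩
    rw [pv_mem_comb_filter] at hT
    obtain ⟨hTc, hq⟩ := hT
    refine ⟨hTc, ?_⟩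
    simp only [pvBad, List.any_eq_true, beq_iff_eq]
    refine ⟨s, hs, p, hp, ?_⟩
    exact List.map_inj_left.mpr (fun i hi => beq_iff_eq.mp (hq i hi))
  · rintro ⟨hTc, hb⟩
    simp only [pvBad, List.any_eq_true, beq_iff_eq] at hb
    obtain ⟨s, hs, p, hp, hpat⟩ := hb
    refine ⟨s, hs, p, hp, ?_⟩
    rw [pv_mem_comb_filter]
    exact ⟨hTc, fun i hi => beq_iff_eq.mpr (List.map_inj_left.mp hpat i hi)⟩

-- ===== VERDICT (by name: the statement is the Claim_ definition above) =====
theorem count_explanatory_sets_spec : Claim_equal_count_explanatory_sets := by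
  intro N M spotty_cows plain_cows _hdom _hpre
  unfold Spec_count_explanatory_sets
  rw [pv_countA]
  by_cases hM : M < 3
  · rw [count_explanatory_sets_alt, if_pos hM]
    rw [PySem.List.combinations_eq_nil_of_length_lt]
    · simp
    · rw [PySem.List.length_pyRange_one]; omega
  · rw [count_explanatory_sets_alt, if_neg hM]
    simp only []
    obtain ⟨n, rfl⟩ := Int.eq_ofNat_of_zero_le (by omega : (0:Int) ≤ M)
    set cmb := PySem.List.combinations (PySem.List.pyRange 0 (n:Int) 1) 3 with hcmb
    -- the bad set is a nodup list holding exactly the bad triples of cmb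
    have hnd1 : (spotty_cows.foldl
          (fun b s =>
            plain_cows.foldl
              (fun b p =>
                PySem.Set.update b
                  (PySem.List.combinations
                    ((PySem.List.pyRange 0 (n:Int) 1).filter
                      (fun i => PySem.List.pyGetD s i 0 == PySem.List.pyGetD p i 0)) 3))
              b)
          (PySem.Set.empty : PySem.Set (List Int))).Nodup :=
      pv_nodup_foldl2 _ _ _ _ List.nodup_nil
    have hnd2 : (cmb.filter (pvBad spotty_cows plain_cows)).Nodup :=
      (pv_nodup_combinations _ 3 (PySem.List.nodup_pyRange_one 0 (n:Int))).filter _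
    have hperm := (List.perm_ext_iff_of_nodup hnd1 hnd2).mpr
      (fun T => by rw [pv_badset_mem, List.mem_filter])
    have hlen : PySem.Set.len
        (spotty_cows.foldl
          (fun b s =>
            plain_cows.foldl
              (fun b p =>
                PySem.Set.update b
                  (PySem.List.combinations
                    ((PySem.List.pyRange 0 (n:Int) 1).filter
                      (fun i => PySem.List.pyGetD s i 0 == PySem.List.pyGetD p i 0)) 3))
              b)
          (PySem.Set.empty : PySem.Set (List Int)))
        = ((cmb.countP (pvBad spotty_cows plain_cows)) : Int) := by
      simp only [PySem.Set.len, hperm.length_eq, List.countP_eq_length_filter]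
    rw [hlen]
    -- total = |cmb|
    have htot : PySem.Int.floordiv ((n:Int) * ((n:Int) - 1) * ((n:Int) - 2)) 6 = ((cmb.length : Nat) : Int) := by
      rw [hcmb, pv_length_combinations, PySem.List.length_pyRange_one]
      have e0 : ((n:Int) - 0).toNat = n := by omega
      have e1 : (n:Int) - 1 = ((n - 1 : Nat) : Int) := by omega
      have e2 : (n:Int) - 2 = ((n - 2 : Nat) : Int) := by omega
      rw [e0, e1, e2, ← Nat.cast_mul, ← Nat.cast_mul]
      have e6 : (6 : Int) = ((6 : Nat) : Int) := rfl
      rw [e6, PySem.Int.floordiv_natCast]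
      congr 1
      rw [← pv_six_choose_three, Nat.mul_div_cancel_left _ (by norm_num)]
    rw [htot]
    have hsum := pv_countP_not cmb (pvBad spotty_cows plain_cows)
    have : cmb.countP (fun pos => !(pvBad spotty_cows plain_cows pos))
        = cmb.countP (fun x => !(pvBad spotty_cows plain_cows) x) := rfl
    rw [this]
    omega
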